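-- pv_equiv track=rewrite | github.com/seanchen513/dcp | dcp189 - given array, return length of longest subarray where all its elements are distinct.py | maximal_subarrays2
-- ===== SOURCE A (Python) =====
-- def maximal_subarrays2(arr):
--     n = len(arr)
--     s = set() # to keep track of distinct elements
--
--     start = 0 # start of subarray (sliding window)
--     end = 0
--     subarrays = []
--
--     while end < n:
--         while ((end < n) and (arr[end] not in s)):
--             s.add(arr[end])
--             end += 1
--
--         # duplicate found at position "end"
--         subarrays.append(arr[start:end])
--
--         if end == n:
--             break
--
--         # remove elements from left side until subarray contains no duplicates
--         while arr[end] in s: # note arr[end]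
--             s.remove(arr[start])
--             start += 1
--
--     return subarrays
-- ===== SOURCE B (Python) =====
-- def maximal_subarrays2(arr):
--     if not arr:
--         return []
--     n = len(arr)
--     start = 0
--     last = {}  # value -> most recent index
--     res = []
--     for end in range(n):
--         x = arr[end]
--         j = last.get(x, -1)
--         if j >= start:
--             res.append(arr[start:end])
--             start = j + 1
--         last[x] = end
--     res.append(arr[start:])
--     return res
-- ===== Notes on version B (the rewrite author's own statement) =====
-- stated objective: idiomatic
-- what changed: Replaces A's set with two nested shrink/extend while-loops by a single for-pass that keeps a dict mapping each value to its most recent index and jumps the window start directly past the previous occurrence.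
import Mathlib
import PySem

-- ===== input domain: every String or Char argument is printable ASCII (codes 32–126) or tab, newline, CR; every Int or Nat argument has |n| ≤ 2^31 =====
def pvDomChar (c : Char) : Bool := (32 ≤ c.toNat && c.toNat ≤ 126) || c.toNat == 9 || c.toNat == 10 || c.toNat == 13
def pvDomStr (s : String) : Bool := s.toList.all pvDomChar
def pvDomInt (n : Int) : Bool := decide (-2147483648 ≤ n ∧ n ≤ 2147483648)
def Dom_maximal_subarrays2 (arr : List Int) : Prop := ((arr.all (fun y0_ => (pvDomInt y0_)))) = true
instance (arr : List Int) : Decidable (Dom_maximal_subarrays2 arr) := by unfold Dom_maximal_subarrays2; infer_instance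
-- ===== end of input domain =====

-- B replaces A's set + nested shrink/extend while-loops by one pass with a dict of last
-- occurrences that jumps the window start directly past the previous occurrence (idiomatic,
-- same asymptotic cost).

-- ===== PORT A =====
-- A's three while loops, transliterated; indices are Nat counters, in range at every
-- reachable call (so arr.getD e 0 = arr[end]); the shrink/outer loop fuels are proven
-- sufficient for every reachable state in the lemmas below.

-- inner 'while end < n and arr[end] not in s'
def pvAddLoop (arr : List Int) (fuel : Nat) (s : PySem.Set Int) (e : Nat) :
    PySem.Set Int × Nat :=
  match fuel with
  | 0 => (s, e)
  | f + 1 =>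
    if e < arr.length ∧ PySem.Set.contains s (arr.getD e 0) = false then
      pvAddLoop arr f (PySem.Set.add s (arr.getD e 0)) (e + 1)
    else (s, e)

-- 'while arr[end] in s: s.remove(arr[start]); start += 1'
def pvShrinkLoop (arr : List Int) (fuel : Nat) (s : PySem.Set Int) (st e : Nat) :
    PySem.Set Int × Nat :=
  match fuel with
  | 0 => (s, st)
  | f + 1 =>
    if PySem.Set.contains s (arr.getD e 0) then
      match PySem.Set.remove? s (arr.getD st 0) with
      | some s' => pvShrinkLoop arr f s' (st + 1) e
      | none => (s, st)  -- KeyError: unreachable from A's reachable states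
    else (s, st)

-- outer 'while end < n'
def pvOuterLoop (arr : List Int) (fuel : Nat) (s : PySem.Set Int) (st e : Nat)
    (acc : List (List Int)) : List (List Int) :=
  match fuel with
  | 0 => acc
  | f + 1 =>
    if e < arr.length then
      let p := pvAddLoop arr arr.length s e
      let acc1 := acc ++ [PySem.List.slice arr (some (st : Int)) (some (p.2 : Int))]
      if p.2 = arr.length then acc1
      else
        let q := pvShrinkLoop arr arr.length p.1 st p.2
        pvOuterLoop arr f q.1 q.2 p.2 acc1
    else acc

def maximal_subarrays2 (arr : List Int) : List (List Int) :=
  pvOuterLoop arr (arr.length + 1) PySem.Set.empty 0 0 []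

-- ===== PORT B =====
-- 'for end in range(n)' of Source B as the obvious structural recursion on end
def pvAltLoop (arr : List Int) (fuel : Nat) (e : Nat) (st : Int) (last : PySem.Dict Int Int)
    (res : List (List Int)) : Int × List (List Int) :=
  match fuel with
  | 0 => (st, res)
  | f + 1 =>
    if e < arr.length then
      let x := arr.getD e 0
      let j := last.getD x (-1)
      if st ≤ j then
        pvAltLoop arr f (e + 1) (j + 1) (last.insert x (e : Int))
          (res ++ [PySem.List.slice arr (some st) (some (e : Int))])
      else
        pvAltLoop arr f (e + 1) st (last.insert x (e : Int)) res
    else (st, res)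

def maximal_subarrays2_alt (arr : List Int) : List (List Int) :=
  if arr.isEmpty then []
  else
    let p := pvAltLoop arr arr.length 0 0 PySem.Dict.empty []
    p.2 ++ [PySem.List.slice arr (some p.1) none]

-- ===== PRECONDITION & SPEC =====
def Spec_maximal_subarrays2 (arr : List Int) (out : List (List Int)) : Prop := out = maximal_subarrays2_alt arr
instance (arr : List Int) (out : List (List Int)) : Decidable (Spec_maximal_subarrays2 arr out) := by unfold Spec_maximal_subarrays2; infer_instance

-- ===== CLAIM (what is proved, stated in full; the proofs are below) =====
def Claim_equal_maximal_subarrays2 : Prop := ∀ (arr : List Int), Dom_maximal_subarrays2 arr → Spec_maximal_subarrays2 arr (maximal_subarrays2 arr)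

-- ===== LEMMAS AND PROOFS =====

def pvWin (arr : List Int) (st e : Nat) : List Int := (arr.drop st).take (e - st)

def pvBuildLast (arr : List Int) (e : Nat) : PySem.Dict Int Int :=
  (List.range e).foldl (fun d k => d.insert (arr.getD k 0) (k : Int)) PySem.Dict.empty

lemma pvWin_mem_iff (arr : List Int) (st e : Nat) (he : e ≤ arr.length) (x : Int) :
    x ∈ pvWin arr st e ↔ ∃ k, st ≤ k ∧ k < e ∧ arr.getD k 0 = x := by
  unfold pvWin
  constructor
  · intro hx
    obtain ⟨i, hi, hgi⟩ := List.mem_iff_getElem.1 hx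
    have hlen : ((arr.drop st).take (e - st)).length = min (e - st) (arr.length - st) := by
      simp
    refine ⟨st + i, by omega, by omega, ?_⟩
    have hi' : st + i < arr.length := by omega
    rw [List.getD_eq_getElem _ _ hi']
    rw [List.getElem_take, List.getElem_drop] at hgi
    exact hgi
  · rintro ⟨k, hsk, hke, hk⟩
    have hk' : k < arr.length := by omega
    rw [List.getD_eq_getElem _ _ hk'] at hk
    rw [List.mem_iff_getElem]
    have hlen : ((arr.drop st).take (e - st)).length = min (e - st) (arr.length - st) := by simp
    refine ⟨k - st, by omega, ?_⟩
    rw [List.getElem_take, List.getElem_drop]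
    simpa [Nat.add_sub_cancel' hsk] using hk

lemma pvWin_succ (arr : List Int) (st e : Nat) (hse : st ≤ e) (he : e < arr.length) :
    pvWin arr st (e + 1) = pvWin arr st e ++ [arr.getD e 0] := by
  unfold pvWin
  have h1 : e + 1 - st = (e - st) + 1 := by omega
  rw [h1, List.take_add_one]
  have he' : e - st < (arr.drop st).length := by simp; omega
  rw [List.getElem?_eq_getElem he']
  rw [List.getElem_drop]
  rw [List.getD_eq_getElem _ _ (by omega : e < arr.length)]
  have : st + (e - st) = e := by omega
  simp [this]

lemma pvWin_drop (arr : List Int) (st st' e : Nat) (h : st ≤ st') :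
    pvWin arr st' e = (pvWin arr st e).drop (st' - st) := by
  unfold pvWin
  rw [List.drop_take, List.drop_drop]
  have h1 : st + (st' - st) = st' := by omega
  have h2 : e - st - (st' - st) = e - st' := by omega
  rw [h1, h2]

lemma pvBuildLast_succ (arr : List Int) (e : Nat) :
    pvBuildLast arr (e + 1) = (pvBuildLast arr e).insert (arr.getD e 0) (e : Int) := by
  unfold pvBuildLast
  rw [List.range_succ, List.foldl_append]
  rfl

lemma pvBuildLast_getD (arr : List Int) (e : Nat) (x : Int) :
    ((pvBuildLast arr e).getD x (-1) = -1 ∧ ∀ k, k < e → arr.getD k 0 ≠ x) ∨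
    (∃ j : Nat, j < e ∧ (pvBuildLast arr e).getD x (-1) = (j : Int) ∧ arr.getD j 0 = x ∧
      ∀ k, j < k → k < e → arr.getD k 0 ≠ x) := by
  induction e with
  | zero => left; exact ⟨by simp [pvBuildLast, PySem.Dict.getD_empty], by omega⟩
  | succ e ih =>
    rw [pvBuildLast_succ, PySem.Dict.getD_insert]
    by_cases hx : x = arr.getD e 0
    · right
      exact ⟨e, by omega, by simp [hx], hx.symm, by omega⟩
    · simp only [if_neg hx]
      rcases ih with ⟨h1, h2⟩ | ⟨j, hj, hgd, haj, hmax⟩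
      · left
        refine ⟨h1, fun k hk => ?_⟩
        rcases Nat.lt_succ_iff_lt_or_eq.1 hk with h | h
        · exact h2 k h
        · subst h; exact fun hc => hx hc.symm
      · right
        refine ⟨j, by omega, hgd, haj, fun k hk1 hk2 => ?_⟩
        rcases Nat.lt_succ_iff_lt_or_eq.1 hk2 with h | h
        · exact hmax k hk1 h
        · subst h; exact fun hc => hx hc.symm

lemma pvAddLoop_spec (arr : List Int) : ∀ fuel e st, arr.length - e ≤ fuel → st ≤ e → e ≤ arr.length →
    (pvWin arr st e).Nodup →
    ∃ e1, pvAddLoop arr fuel (pvWin arr st e) e = (pvWin arr st e1, e1) ∧ e ≤ e1 ∧ e1 ≤ arr.length ∧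
      (pvWin arr st e1).Nodup ∧ (∀ k, e ≤ k → k < e1 → arr.getD k 0 ∉ pvWin arr st k) ∧
      (e1 < arr.length → arr.getD e1 0 ∈ pvWin arr st e1) := by
  intro fuel
  induction fuel with
  | zero =>
    intro e st hf hse hel hnd
    have he : e = arr.length := by omega
    exact ⟨e, rfl, le_refl _, by omega, hnd, by omega, by omega⟩
  | succ f ih =>
    intro e st hf hse hel hnd
    by_cases he : e < arr.length
    · by_cases hmem : arr.getD e 0 ∈ pvWin arr st e
      · refine ⟨e, ?_, le_refl _, hel, hnd, by omega, fun _ => hmem⟩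
        rw [pvAddLoop, if_neg]
        intro ⟨_, hc⟩
        rw [Bool.eq_false_iff] at hc
        exact hc ((PySem.Set.contains_iff _ _).2 hmem)
      · have hc : PySem.Set.contains (pvWin arr st e) (arr.getD e 0) = false := by
          rw [Bool.eq_false_iff]
          intro h
          exact hmem ((PySem.Set.contains_iff _ _).1 h)
        have hstep : PySem.Set.add (pvWin arr st e) (arr.getD e 0) = pvWin arr st (e + 1) := by
          rw [PySem.Set.add_of_not_mem hmem, pvWin_succ arr st e hse he]
        have hnd' : (pvWin arr st (e + 1)).Nodup := by
          rw [pvWin_succ arr st e hse he]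
          simp only [List.nodup_append, List.nodup_singleton, true_and]
          refine ⟨hnd, ?_⟩
          intro a ha b hb
          simp only [List.mem_singleton] at hb
          subst hb
          exact fun hab => hmem (hab ▸ ha)
        obtain ⟨e1, heq, h1, h2, h3, h4, h5⟩ :=
          ih (e + 1) st (by omega) (by omega) (by omega) hnd'
        refine ⟨e1, ?_, by omega, h2, h3, ?_, h5⟩
        · rw [pvAddLoop, if_pos ⟨he, hc⟩, hstep]
          exact heq
        · intro k hk1 hk2
          rcases Nat.eq_or_lt_of_le hk1 with h | h
          · subst h; exact hmem
          · exact h4 k h hk2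
    · refine ⟨e, ?_, le_refl _, hel, hnd, by omega, by omega⟩
      rw [pvAddLoop, if_neg (by omega)]

lemma pvWin_cons (arr : List Int) (st e : Nat) (h1 : st < e) (h2 : st < arr.length) :
    pvWin arr st e = arr.getD st 0 :: pvWin arr (st + 1) e := by
  unfold pvWin
  rw [List.drop_eq_getElem_cons h2]
  have h3 : e - st = (e - (st + 1)) + 1 := by omega
  rw [h3, List.take_succ_cons, List.getD_eq_getElem _ _ h2]

lemma pvShrinkLoop_spec (arr : List Int) (j e : Nat) (hje : j < e) (hel : e ≤ arr.length)
    (hax : arr.getD j 0 = arr.getD e 0)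
    (hmax : ∀ k, j < k → k < e → arr.getD k 0 ≠ arr.getD e 0) :
    ∀ fuel st, st ≤ j + 1 → j + 1 - st ≤ fuel → (pvWin arr st e).Nodup →
    pvShrinkLoop arr fuel (pvWin arr st e) st e = (pvWin arr (j + 1) e, j + 1) := by
  intro fuel
  induction fuel with
  | zero =>
    intro st hst hf hnd
    have hst' : st = j + 1 := by omega
    subst hst'
    rfl
  | succ f ih =>
    intro st hst hf hnd
    rcases Nat.eq_or_lt_of_le hst with hstop | hcont
    · -- st = j + 1 : arr[e] no longer in the window, loop exits
      subst hstop
      have hnm : arr.getD e 0 ∉ pvWin arr (j + 1) e := by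
        rw [pvWin_mem_iff arr _ _ hel]
        rintro ⟨k, hk1, hk2, hk3⟩
        exact hmax k (by omega) hk2 hk3
      have hc : PySem.Set.contains (pvWin arr (j + 1) e) (arr.getD e 0) = false := by
        rw [Bool.eq_false_iff]
        exact fun h => hnm ((PySem.Set.contains_iff _ _).1 h)
      rw [pvShrinkLoop, hc]
      simp
    · -- st ≤ j : arr[e] is in the window (at j); remove arr[st] (the head) and recurse
      have hstj : st ≤ j := by omega
      have hstl : st < arr.length := by omega
      have hmem : arr.getD e 0 ∈ pvWin arr st e := by
        rw [pvWin_mem_iff arr _ _ hel]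
        exact ⟨j, hstj, hje, hax⟩
      have hc : PySem.Set.contains (pvWin arr st e) (arr.getD e 0) = true :=
        (PySem.Set.contains_iff _ _).2 hmem
      have hcons := pvWin_cons arr st e (by omega) hstl
      have hhead : arr.getD st 0 ∈ pvWin arr st e := by
        rw [hcons]; exact List.mem_cons_self
      have hnd' : (pvWin arr (st + 1) e).Nodup := by
        rw [hcons] at hnd; exact hnd.of_cons
      have hnotin : arr.getD st 0 ∉ pvWin arr (st + 1) e := by
        rw [hcons] at hnd
        exact (List.nodup_cons.1 hnd).1
      have hrem : PySem.Set.remove? (pvWin arr st e) (arr.getD st 0)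
          = some (pvWin arr (st + 1) e) := by
        rw [PySem.Set.remove?_of_mem hhead]
        congr 1
        unfold PySem.Set.discard
        rw [hcons]
        simp only [List.filter_cons]
        have : (!arr.getD st 0 == arr.getD st 0) = false := by simp
        rw [this]
        simp only [Bool.false_eq_true, if_false]
        apply List.filter_eq_self.2
        intro b hb
        have hbne : b ≠ arr.getD st 0 := fun hbe => hnotin (hbe ▸ hb)
        simpa [List.getD] using hbne
      rw [pvShrinkLoop, hc]
      simp only [if_true, hrem]
      exact ih (st + 1) (by omega) (by omega) hnd'

lemma pvWin_unique (arr : List Int) (st e : Nat) (hnd : (pvWin arr st e).Nodup)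
    (he : e ≤ arr.length) {k1 k2 : Nat} (h1 : st ≤ k1) (h2 : k1 < e) (h3 : st ≤ k2)
    (h4 : k2 < e) (hv : arr.getD k1 0 = arr.getD k2 0) : k1 = k2 := by
  have hlen : (pvWin arr st e).length = min (e - st) (arr.length - st) := by
    simp [pvWin]
  have hg : ∀ i (hi : i < (pvWin arr st e).length), (pvWin arr st e)[i] = arr.getD (st + i) 0 := by
    intro i hi
    unfold pvWin
    rw [List.getElem_take, List.getElem_drop,
      List.getD_eq_getElem _ _ (by omega : st + i < arr.length)]
  have hi1 : k1 - st < (pvWin arr st e).length := by omega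
  have hi2 : k2 - st < (pvWin arr st e).length := by omega
  have := (List.Nodup.getElem_inj_iff hnd (hi := hi1) (hj := hi2)).1 ?_
  · omega
  · rw [hg _ hi1, hg _ hi2]
    have e1 : st + (k1 - st) = k1 := by omega
    have e2 : st + (k2 - st) = k2 := by omega
    rw [e1, e2]
    exact hv

lemma pvAltLoop_skip (arr : List Int) (st : Nat) (e1 : Nat) (he1 : e1 ≤ arr.length) :
    ∀ d e res, e + d = e1 → (∀ k, e ≤ k → k < e1 → arr.getD k 0 ∉ pvWin arr st k) →
    pvAltLoop arr (arr.length - e) e (st : Int) (pvBuildLast arr e) res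
      = pvAltLoop arr (arr.length - e1) e1 (st : Int) (pvBuildLast arr e1) res := by
  intro d
  induction d with
  | zero =>
    intro e res he _
    have heq : e = e1 := by omega
    subst heq
    rfl
  | succ d ih =>
    intro e res he hnone
    have hel : e < arr.length := by omega
    have hx : arr.getD e 0 ∉ pvWin arr st e := hnone e (le_refl _) (by omega)
    have hcond : ¬ ((st : Int) ≤ (pvBuildLast arr e).getD (arr.getD e 0) (-1)) := by
      rcases pvBuildLast_getD arr e (arr.getD e 0) with ⟨hg, _⟩ | ⟨j, hj, hg, haj, _⟩
      · rw [hg]; omega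
      · rw [hg]
        intro hle
        have hstj : st ≤ j := by exact_mod_cast hle
        exact hx ((pvWin_mem_iff arr st e (by omega) _).2 ⟨j, hstj, hj, haj⟩)
    have hfe : arr.length - e = (arr.length - (e + 1)) + 1 := by omega
    rw [hfe, pvAltLoop, if_pos hel]
    simp only [if_neg hcond]
    rw [← pvBuildLast_succ]
    exact ih (e + 1) res (by omega) (fun k hk1 hk2 => hnone k (by omega) hk2)

lemma pvMain (arr : List Int) : ∀ fuel st e acc, st ≤ e → e < arr.length →
    arr.length - e ≤ fuel → (pvWin arr st e).Nodup → arr.getD e 0 ∉ pvWin arr st e →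
    pvOuterLoop arr fuel (pvWin arr st e) st e acc =
      (pvAltLoop arr (arr.length - e) e (st : Int) (pvBuildLast arr e) acc).2 ++
        [PySem.List.slice arr
          (some (pvAltLoop arr (arr.length - e) e (st : Int) (pvBuildLast arr e) acc).1) none] := by
  intro fuel
  induction fuel with
  | zero => intro st e acc _ _ hf _ _; omega
  | succ f ih =>
    intro st e acc hse he hf hnd hnm
    obtain ⟨e1, heq, h1, h2, h3, h4, h5⟩ :=
      pvAddLoop_spec arr arr.length e st (by omega) hse (by omega) hnd
    have hee1 : e < e1 := by
      rcases Nat.eq_or_lt_of_le h1 with h | h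
      · exfalso; exact hnm (h ▸ h5 (h ▸ he))
      · exact h
    have hslice : PySem.List.slice arr (some (st : Int)) (some (e1 : Int)) = pvWin arr st e1 := by
      rw [PySem.List.slice_natCast]; rfl
    rw [pvOuterLoop]
    simp only [if_pos he, heq, hslice]
    by_cases hend : e1 = arr.length
    · -- the extend loop ran to the end of the array: append the final window and stop
      subst hend
      rw [if_pos rfl]
      rw [pvAltLoop_skip arr st arr.length (le_refl _) (arr.length - e) e acc (by omega) h4,
        Nat.sub_self]
      have hdrop : pvWin arr st arr.length = arr.drop st := by
        unfold pvWin
        exact List.take_of_length_le (by simp)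
      show acc ++ [pvWin arr st arr.length]
          = acc ++ [PySem.List.slice arr (some ((st : Nat) : Int)) none]
      rw [PySem.List.slice_from_natCast, hdrop]
    · rw [if_neg hend]
      have he1 : e1 < arr.length := by omega
      have hmem : arr.getD e1 0 ∈ pvWin arr st e1 := h5 he1
      obtain ⟨j, hj1, hj2, hj3⟩ := (pvWin_mem_iff arr st e1 (by omega) _).1 hmem
      have hmax : ∀ k, j < k → k < e1 → arr.getD k 0 ≠ arr.getD e1 0 := by
        intro k hk1 hk2 hkv
        have := pvWin_unique arr st e1 h3 (by omega) (by omega) hk2 hj1 hj2 (hkv.trans hj3.symm)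
        omega
      have hshr := pvShrinkLoop_spec arr j e1 hj2 (by omega) hj3 hmax arr.length st
        (by omega) (by omega) h3
      rw [hshr]
      have hnd2 : (pvWin arr (j + 1) e1).Nodup := by
        rw [pvWin_drop arr st (j + 1) e1 (by omega)]
        exact h3.sublist (List.drop_sublist _ _)
      have hnm2 : arr.getD e1 0 ∉ pvWin arr (j + 1) e1 := by
        rw [pvWin_mem_iff arr _ _ (by omega)]
        rintro ⟨k, hk1, hk2, hk3⟩
        exact hmax k (by omega) hk2 hk3
      rw [ih (j + 1) e1 _ (by omega) he1 (by omega) hnd2 hnm2]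
      -- now identify the two pvAltLoop runs
      have hgd : (pvBuildLast arr e1).getD (arr.getD e1 0) (-1) = (j : Int) := by
        rcases pvBuildLast_getD arr e1 (arr.getD e1 0) with ⟨_, hall⟩ | ⟨j', hj', hg, haj', hmax'⟩
        · exact absurd hj3 (hall j hj2)
        · have hstj' : st ≤ j' := by
            by_contra hlt
            exact hmax' j (by omega) hj2 hj3
          have : j' = j :=
            pvWin_unique arr st e1 h3 (by omega) hstj' hj' hj1 hj2 (haj'.trans hj3.symm)
          rw [hg, this]
      have hfe1 : arr.length - e1 = (arr.length - (e1 + 1)) + 1 := by omega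
      have hB : pvAltLoop arr (arr.length - e) e (st : Int) (pvBuildLast arr e) acc
          = pvAltLoop arr (arr.length - (e1 + 1)) (e1 + 1) ((j : Int) + 1)
              (pvBuildLast arr (e1 + 1)) (acc ++ [pvWin arr st e1]) := by
        rw [pvAltLoop_skip arr st e1 (by omega) (e1 - e) e acc (by omega) h4]
        rw [hfe1, pvAltLoop, if_pos he1]
        simp only [hgd, if_pos (by exact_mod_cast hj1 : (st : Int) ≤ (j : Int))]
        rw [← pvBuildLast_succ, hslice]
      have hq : pvAltLoop arr (arr.length - e1) e1 ((j + 1 : Nat) : Int) (pvBuildLast arr e1)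
            (acc ++ [pvWin arr st e1])
          = pvAltLoop arr (arr.length - (e1 + 1)) (e1 + 1) ((j : Int) + 1)
              (pvBuildLast arr (e1 + 1)) (acc ++ [pvWin arr st e1]) := by
        rw [hfe1, pvAltLoop, if_pos he1]
        simp only [hgd, if_neg (by push_cast; omega : ¬ (((j + 1 : Nat) : Int) ≤ (j : Int)))]
        rw [← pvBuildLast_succ, Nat.cast_add, Nat.cast_one]
      rw [hB, ← hq]

-- ===== VERDICT (by name: the statement is the Claim_ definition above) =====

theorem maximal_subarrays2_spec : Claim_equal_maximal_subarrays2 := by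
  intro arr _
  unfold Spec_maximal_subarrays2 maximal_subarrays2 maximal_subarrays2_alt
  by_cases harr : arr = []
  · subst harr; rfl
  · have hlen : 0 < arr.length := List.length_pos_iff.2 harr
    have hne : arr.isEmpty = false := by simp [harr]
    have h0 : PySem.Set.empty = pvWin arr 0 0 := by simp [pvWin, PySem.Set.empty]
    have hb0 : pvBuildLast arr 0 = PySem.Dict.empty := rfl
    have hmain := pvMain arr (arr.length + 1) 0 0 [] (le_refl 0) hlen (by omega)
      (by simp [pvWin]) (by simp [pvWin])
    rw [h0, hmain]
    simp only [hne, Bool.false_eq_true, if_false, hb0, Nat.cast_zero, Nat.sub_zero]
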